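-- pv_equiv track=rewrite | github.com/ffalswo2/algorithm-study | 프로그래머스 스터디/1주차/게임아이템/solution.py | solution
-- ===== SOURCE A (Python) =====
-- from collections import deque
-- import heapq
--
-- def solution(healths, items):
--     answer = []
--     heap = []
--     # 체력이 적은순으로
--     healths.sort()
--
--     # 인덱스를 포함한 아이템 리스트 작성
--     items = [(buff, debuff) for buff, debuff in enumerate(items, 1)]
--     item_list = deque(sorted(items, key=lambda x: x[1][1]))
--
--     for hp in healths:
--         # for문을 통해 index를 구할시 아이템 사용(pop)시에 list길이가 바껴 index error
--         # -> enumerate()를 통해 인덱스를 포함한 리스트를 만들어 while문으로 구성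
--         while item_list:
--             idx = item_list[0][0]
--             buff = item_list[0][1][0]
--             debuff = item_list[0][1][1]
--
--             if hp - debuff < 100:
--                 break
--
--             # 공격력 가장 높은 것을 찾기위한 우선순위 큐
--             heapq.heappush(heap, (-buff, idx))
--             # 아이템 사용
--             item_list.popleft()
--
--         if heap:
--             # 공격력 가장 높은 것의 인덱스 answer에 삽입
--             answer.append(heapq.heappop(heap)[1])
--
--     return sorted(answer)
-- ===== SOURCE B (Python) =====
-- def solution(healths, items):
--     # same in-place sort of healths as the original
--     healths.sort()
--     # annotate items as (buff, debuff, 1-based index), ordered by debuff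
--     order = sorted([(it[0], it[1], idx) for idx, it in enumerate(items, 1)],
--                    key=lambda t: t[1])
--     answer = []
--     eligible = []
--     i = 0
--     for hp in healths:
--         while i < len(order) and hp - order[i][1] >= 100:
--             eligible.append((order[i][0], order[i][2]))
--             i += 1
--         if eligible:
--             best = min(eligible, key=lambda t: (-t[0], t[1]))
--             eligible.remove(best)
--             answer.append(best[1])
--     return sorted(answer)
-- ===== Notes on version B (the rewrite author's own statement) =====
-- stated objective: simpler
-- what changed: Replaces A's heapq priority queue and deque with a plain eligible list swept by an index pointer: each pop is a single linear min-scan (largest buff, smallest index) plus list.remove, so the heap, its negated-key encoding and the deque disappear.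
import Mathlib
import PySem

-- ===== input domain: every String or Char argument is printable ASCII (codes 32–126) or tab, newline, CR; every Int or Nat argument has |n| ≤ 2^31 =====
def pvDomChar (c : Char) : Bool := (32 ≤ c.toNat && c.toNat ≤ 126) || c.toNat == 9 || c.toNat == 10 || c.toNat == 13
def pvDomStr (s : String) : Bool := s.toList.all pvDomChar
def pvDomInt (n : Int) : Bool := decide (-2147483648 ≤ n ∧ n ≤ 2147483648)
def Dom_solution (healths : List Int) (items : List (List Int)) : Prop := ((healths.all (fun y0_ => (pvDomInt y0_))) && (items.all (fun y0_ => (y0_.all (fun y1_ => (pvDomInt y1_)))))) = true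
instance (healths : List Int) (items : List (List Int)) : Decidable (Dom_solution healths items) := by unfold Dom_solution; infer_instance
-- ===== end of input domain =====

-- B replaces A's heapq priority queue and deque with a plain eligible list, a sweep
-- pointer and a linear min-scan per pop (objective: simpler — no heap, no deque).
-- Both A and B sort `healths` in place in Python; the equivalence proved here is
-- about the RETURN value (the mutation of `healths` is identical in both anyway).

-- ===== PORT A =====
-- heapq is used only through heappush/heappop on pairs compared lexicographically; the
-- library calls are ported by their exact contract: the heap is a list kept sorted in
-- Python's lexicographic pair order (heappush = ordered insert, heappop = pop the head,
-- which is the minimum).  Exact for every push/pop sequence.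
def pvLexLt (a b : Int × Int) : Bool := a.1 < b.1 || (a.1 == b.1 && a.2 < b.2)

def pvHeapPush : List (Int × Int) → (Int × Int) → List (Int × Int)
  | [], x => [x]
  | y :: t, x => if pvLexLt x y then x :: y :: t else y :: pvHeapPush t x

-- A's inner `while item_list:` loop; it[0] / it[1] are ported as pyGetD _ _ 0, exact on
-- every input admitted by Pre_solution (all items of length ≥ 2; Python raises otherwise)
def pvWhileA (hp : Int) : List (Int × List Int) → List (Int × Int) → List (Int × List Int) × List (Int × Int)
  | [], heap => ([], heap)
  | (idx, it) :: rest, heap =>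
    let buff := PySem.List.pyGetD it 0 0
    let debuff := PySem.List.pyGetD it 1 0
    if hp - debuff < 100 then ((idx, it) :: rest, heap)
    else pvWhileA hp rest (pvHeapPush heap (-buff, idx))

-- one iteration of A's `for hp in healths:` body; state = (answer, item_list, heap)
def pvStepA (st : List Int × List (Int × List Int) × List (Int × Int)) (hp : Int) :
    List Int × List (Int × List Int) × List (Int × Int) :=
  match pvWhileA hp st.2.1 st.2.2 with
  | (il', heap') =>
    match heap' with
    | [] => (st.1, il', [])
    | top :: rest => (st.1 ++ [top.2], il', rest)

def solution (healths : List Int) (items : List (List Int)) : List Int :=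
  -- healths.sort()
  let healths' := PySem.List.sorted healths (fun x => x) false
  -- item_list = deque(sorted(enumerate(items, 1), key=lambda x: x[1][1]))
  let item_list := PySem.List.sorted (PySem.List.enumerate items 1) (fun x => PySem.List.pyGetD x.2 1 0) false
  PySem.List.sorted (healths'.foldl pvStepA ([], item_list, [])).1 (fun x => x) false

-- ===== PORT B =====
-- B's inner `while i < len(order) and hp - order[i][1] >= 100:` loop (i : Nat pointer)
def pvAdvance (order : List (Int × Int × Int)) (hp : Int) (i : Nat) (elig : List (Int × Int)) :
    Nat × List (Int × Int) :=
  if h : i < order.length then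
    if 100 ≤ hp - order[i].2.1 then
      pvAdvance order hp (i + 1) (elig ++ [(order[i].1, order[i].2.2)])
    else (i, elig)
  else (i, elig)
termination_by order.length - i

-- one iteration of B's `for hp in healths:` body; state = (answer, i, eligible)
def pvStepB (order : List (Int × Int × Int)) (st : List Int × Nat × List (Int × Int)) (hp : Int) :
    List Int × Nat × List (Int × Int) :=
  match pvAdvance order hp st.2.1 st.2.2 with
  | (i', elig') =>
    if elig'.isEmpty then (st.1, i', elig')
    else
      match PySem.List.min2? elig' (fun t => -t.1) (fun t => t.2) with
      | some best => (st.1 ++ [best.2], i', (PySem.List.remove? elig' best).getD elig')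
      | none => (st.1, i', elig')  -- unreachable: elig' is nonempty

def solution_alt (healths : List Int) (items : List (List Int)) : List Int :=
  -- healths.sort()
  let healths' := PySem.List.sorted healths (fun x => x) false
  -- order = sorted([(it[0], it[1], idx) for idx, it in enumerate(items, 1)], key=lambda t: t[1])
  let order := PySem.List.sorted
      ((PySem.List.enumerate items 1).map
        (fun p => (PySem.List.pyGetD p.2 0 0, PySem.List.pyGetD p.2 1 0, p.1)))
      (fun t => t.2.1) false
  PySem.List.sorted (healths'.foldl (pvStepB order) ([], 0, [])).1 (fun x => x) false

-- ===== PRECONDITION & SPEC =====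
-- Pre_ excludes items with fewer than two entries: there Python A (and Python B) raise
-- IndexError on it[1] inside the sort key.
def Pre_solution (healths : List Int) (items : List (List Int)) : Prop :=
  ∀ it ∈ items, 2 ≤ it.length
instance (healths : List Int) (items : List (List Int)) : Decidable (Pre_solution healths items) := by
  unfold Pre_solution; infer_instance

def pvWitness_solution : List Int × List (List Int) := ([100, 150], [[3, 10], [5, 50]])

def Spec_solution (healths : List Int) (items : List (List Int)) (out : List Int) : Prop := out = solution_alt healths items
instance (healths : List Int) (items : List (List Int)) (out : List Int) : Decidable (Spec_solution healths items out) := by unfold Spec_solution; infer_instance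

-- ===== CLAIM (what is proved, stated in full; the proofs are below) =====
def Claim_equal_solution : Prop := ∀ (healths : List Int) (items : List (List Int)), Dom_solution healths items → Pre_solution healths items → Spec_solution healths items (solution healths items)

-- ===== LEMMAS AND PROOFS =====

-- negation map (buff, idx) ↦ (-buff, idx), the heap's view of an eligible entry
def pvNeg (p : Int × Int) : Int × Int := (-p.1, p.2)
-- strict lexicographic order on pairs, as a Prop
def pvSlt (a b : Int × Int) : Prop := a.1 < b.1 ∨ (a.1 = b.1 ∧ a.2 < b.2)
-- the annotation map: A's (idx, item) entry ↦ B's (buff, debuff, idx) entry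
def pvG (p : Int × List Int) : Int × Int × Int :=
  (PySem.List.pyGetD p.2 0 0, PySem.List.pyGetD p.2 1 0, p.1)

theorem pvNeg_inj : Function.Injective pvNeg := by
  intro a b h
  simp only [pvNeg, Prod.mk.injEq] at h
  exact Prod.ext (by omega) h.2

theorem pvLexLt_iff (a b : Int × Int) : pvLexLt a b = true ↔ pvSlt a b := by
  simp [pvLexLt, pvSlt]

theorem pvSlt_asymm {a b : Int × Int} (h : pvSlt a b) : ¬ pvSlt b a := by
  rcases h with h | ⟨h1, h2⟩ <;> rintro (h' | ⟨h1', h2'⟩) <;> omega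

theorem pvSlt_trans {a b c : Int × Int} (h1 : pvSlt a b) (h2 : pvSlt b c) : pvSlt a c := by
  rcases h1 with h1 | ⟨h1, h1'⟩ <;> rcases h2 with h2 | ⟨h2, h2'⟩ <;>
    simp only [pvSlt] <;> omega

theorem pvSlt_of_ne_of_not {a b : Int × Int} (hne : a ≠ b) (h : ¬ pvSlt a b) : pvSlt b a := by
  simp only [pvSlt] at *
  by_cases h1 : a.1 = b.1
  · refine Or.inr ⟨h1.symm, ?_⟩
    have : a.2 ≠ b.2 := fun h2 => hne (Prod.ext h1 h2)
    omega
  · omega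

theorem heapPush_perm (h : List (Int × Int)) (x : Int × Int) :
    (pvHeapPush h x).Perm (x :: h) := by
  induction h with
  | nil => simp [pvHeapPush]
  | cons y t ih =>
    simp only [pvHeapPush]
    split
    · exact List.Perm.refl _
    · exact (List.Perm.cons y ih).trans (List.Perm.swap x y t)

theorem heapPush_pairwise {h : List (Int × Int)} {x : Int × Int}
    (hs : h.Pairwise pvSlt) (hne : ∀ y ∈ h, x ≠ y) :
    (pvHeapPush h x).Pairwise pvSlt := by
  induction h with
  | nil => simp [pvHeapPush]
  | cons y t ih =>
    rcases List.pairwise_cons.mp hs with ⟨hy, ht⟩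
    simp only [pvHeapPush]
    split
    · rename_i hlt
      have hxy : pvSlt x y := (pvLexLt_iff x y).mp hlt
      exact List.pairwise_cons.mpr ⟨by
        intro z hz
        rcases List.mem_cons.mp hz with rfl | hz
        · exact hxy
        · exact pvSlt_trans hxy (hy z hz), hs⟩
    · rename_i hnlt
      have hxy : pvSlt y x :=
        pvSlt_of_ne_of_not (hne y (List.mem_cons_self)) (fun hc => hnlt ((pvLexLt_iff x y).mpr hc))
      refine List.pairwise_cons.mpr ⟨?_, ih ht (fun z hz => hne z (List.mem_cons_of_mem _ hz))⟩
      intro z hz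
      have : z ∈ x :: t := (heapPush_perm t x).mem_iff.mp hz
      rcases List.mem_cons.mp this with rfl | hz'
      · exact hxy
      · exact hy z hz'

-- `remove?` of a member removes exactly the first occurrence
theorem remove?_of_mem {a : Int × Int} :
    ∀ {l : List (Int × Int)}, a ∈ l → PySem.List.remove? l a = some (l.erase a) := by
  intro l h
  induction l with
  | nil => cases h
  | cons x t ih =>
    by_cases hx : x = a
    · subst hx
      simp [PySem.List.remove?, List.idxOf?, List.findIdx?_cons]
    · have ha : a ∈ t := by
        rcases List.mem_cons.mp h with h1 | h1
        · exact absurd h1.symm hx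
        · exact h1
      have ih' := ih ha
      simp only [PySem.List.remove?] at ih' ⊢
      cases hidx : List.idxOf? a t with
      | none => simp [hidx] at ih'
      | some k =>
        simp only [hidx, Option.map_some, Option.some.injEq] at ih'
        have hxa : (x == a) = false := by simp [hx]
        rw [List.idxOf?, List.findIdx?_cons]
        simp only [hxa]
        rw [show List.findIdx? (fun b => b == a) t = List.idxOf? a t from rfl, hidx]
        simp [hxa, ih']

-- the min2? comparison used by B is exactly pvSlt on the negated pairs
theorem min2cond_iff (x m : Int × Int) :
    (decide (-x.1 < -m.1) || (!decide (-m.1 < -x.1) && decide (x.2 < m.2))) = true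
      ↔ pvSlt (pvNeg x) (pvNeg m) := by
  simp only [pvSlt, pvNeg, Bool.or_eq_true, Bool.and_eq_true, Bool.not_eq_true',
    decide_eq_true_eq, decide_eq_false_iff_not]
  omega

-- the fold inside min2? keeps the strict minimum once seeded
theorem min2?_seed (m : Int × Int) :
    ∀ (l : List (Int × Int)) (c : Int × Int), (m = c ∨ m ∈ l) →
      (∀ y, (y = c ∨ y ∈ l) → y ≠ m → pvSlt (pvNeg m) (pvNeg y)) →
      PySem.List.min2? (c :: l) (fun t => -t.1) (fun t => t.2) = some m := by
  intro l
  induction l with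
  | nil =>
    intro c hm _
    rcases hm with rfl | h
    · simp [PySem.List.min2?]
    · cases h
  | cons x t ih =>
    intro c hm hmin
    have hirr : ∀ a : Int × Int, ¬ pvSlt a a := by intro a; simp [pvSlt]
    by_cases hb : (decide (-x.1 < -c.1) || (!decide (-c.1 < -x.1) && decide (x.2 < c.2))) = true
    · have hcond : pvSlt (pvNeg x) (pvNeg c) := (min2cond_iff x c).mp hb
      have key : PySem.List.min2? (c :: x :: t) (fun t => -t.1) (fun t => t.2)
          = PySem.List.min2? (x :: t) (fun t => -t.1) (fun t => t.2) := by
        simp only [PySem.List.min2?, List.foldl_cons]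
        congr 1
        show (if (decide (-x.1 < -c.1) || (!decide (-c.1 < -x.1) && decide (x.2 < c.2))) = true
              then some x else some c) = some x
        rw [if_pos hb]
      rw [key]
      refine ih x ?_ ?_
      · rcases hm with rfl | hmem
        · exfalso
          by_cases hxm : x = m
          · subst hxm; exact hirr _ hcond
          · exact pvSlt_asymm (hmin x (Or.inr List.mem_cons_self) hxm) hcond
        · rcases List.mem_cons.mp hmem with hmx | hmt
          · exact Or.inl hmx
          · exact Or.inr hmt
      · intro y hy hne
        refine hmin y ?_ hne
        rcases hy with rfl | hy
        · exact Or.inr List.mem_cons_self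
        · exact Or.inr (List.mem_cons_of_mem _ hy)
    · have hcond : ¬ pvSlt (pvNeg x) (pvNeg c) := fun hc => hb ((min2cond_iff x c).mpr hc)
      have key : PySem.List.min2? (c :: x :: t) (fun t => -t.1) (fun t => t.2)
          = PySem.List.min2? (c :: t) (fun t => -t.1) (fun t => t.2) := by
        simp only [PySem.List.min2?, List.foldl_cons]
        congr 1
        show (if (decide (-x.1 < -c.1) || (!decide (-c.1 < -x.1) && decide (x.2 < c.2))) = true
              then some x else some c) = some c
        rw [if_neg (by simpa using hb)]
      rw [key]
      refine ih c ?_ ?_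
      · rcases hm with rfl | hmem
        · exact Or.inl rfl
        · rcases List.mem_cons.mp hmem with hmx | hmt
          · by_cases hmc : m = c
            · exact Or.inl hmc
            · exfalso
              have := hmin c (Or.inl rfl) (fun h => hmc h.symm)
              rw [hmx] at this
              exact hcond this
          · exact Or.inr hmt
      · intro y hy hne
        refine hmin y ?_ hne
        rcases hy with rfl | hy
        · exact Or.inl rfl
        · exact Or.inr (List.mem_cons_of_mem _ hy)

theorem min2?_eq_min {elig : List (Int × Int)} {m : Int × Int} (hm : m ∈ elig)
    (hmin : ∀ y ∈ elig, y ≠ m → pvSlt (pvNeg m) (pvNeg y)) :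
    PySem.List.min2? elig (fun t => -t.1) (fun t => t.2) = some m := by
  cases elig with
  | nil => cases hm
  | cons e t =>
    refine min2?_seed m t e ?_ ?_
    · rcases List.mem_cons.mp hm with h | h
      · exact Or.inl h
      · exact Or.inr h
    · intro y hy hne
      refine hmin y ?_ hne
      rcases hy with rfl | hy
      · exact List.mem_cons_self
      · exact List.mem_cons_of_mem _ hy

-- pop correspondence: the head of the sorted heap is B's min-scan pick
theorem pop_corr {elig heap : List (Int × Int)} {h0 : Int × Int} {hrest : List (Int × Int)}
    (hperm : heap.Perm (elig.map pvNeg)) (hpair : heap.Pairwise pvSlt)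
    (hheap : heap = h0 :: hrest) :
    ∃ m, m ∈ elig ∧ pvNeg m = h0 ∧
      PySem.List.min2? elig (fun t => -t.1) (fun t => t.2) = some m ∧
      PySem.List.remove? elig m = some (elig.erase m) ∧
      hrest.Perm ((elig.erase m).map pvNeg) ∧ hrest.Pairwise pvSlt := by
  subst hheap
  have h0mem : h0 ∈ elig.map pvNeg := hperm.mem_iff.mp List.mem_cons_self
  rcases List.mem_map.mp h0mem with ⟨m, hm, hmn⟩
  have hmin : ∀ y ∈ elig, y ≠ m → pvSlt (pvNeg m) (pvNeg y) := by
    intro y hy hne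
    have hyheap : pvNeg y ∈ h0 :: hrest :=
      hperm.symm.mem_iff.mp (List.mem_map_of_mem hy)
    rcases List.mem_cons.mp hyheap with heq | hyt
    · exact absurd (pvNeg_inj (heq.trans hmn.symm)) hne
    · rw [hmn]
      exact (List.pairwise_cons.mp hpair).1 _ hyt
  refine ⟨m, hm, hmn, min2?_eq_min hm hmin, remove?_of_mem hm, ?_, (List.pairwise_cons.mp hpair).2⟩
  rw [List.map_erase pvNeg_inj, hmn]
  have h1 : ((h0 :: hrest).erase h0).Perm ((elig.map pvNeg).erase h0) := hperm.erase h0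
  simpa [List.erase_cons_head] using h1

-- ===== enumerate: indices are strictly increasing, hence nodup =====
theorem enum_fst_ge : ∀ (xs : List (List Int)) (s : Int) (p : Int × List Int),
    p ∈ PySem.List.enumerate xs s → s ≤ p.1 := by
  intro xs
  induction xs with
  | nil => intro s p h; cases h
  | cons x t ih =>
    intro s p h
    simp only [PySem.List.enumerate] at h
    rcases List.mem_cons.mp h with rfl | h
    · simp
    · have := ih (s + 1) p h
      omega

theorem enum_fst_nodup (xs : List (List Int)) (s : Int) :
    ((PySem.List.enumerate xs s).map Prod.fst).Nodup := by
  induction xs generalizing s with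
  | nil => simp [PySem.List.enumerate]
  | cons x t ih =>
    simp only [PySem.List.enumerate, List.map_cons, List.nodup_cons]
    refine ⟨?_, ih (s + 1)⟩
    intro hmem
    rcases List.mem_map.mp hmem with ⟨p, hp, hps⟩
    have := enum_fst_ge t (s + 1) p hp
    omega

-- ===== sorting the mapped list = mapping the sorted list (same keys) =====
theorem insertBy_map_pvG (x : Int × List Int) :
    ∀ (l : List (Int × List Int)),
      PySem.List.insertBy (fun a b => decide (a.2.1 < b.2.1)) (pvG x) (l.map pvG)
        = (PySem.List.insertBy
            (fun a b => decide (PySem.List.pyGetD a.2 1 0 < PySem.List.pyGetD b.2 1 0)) x l).map pvG := by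
  intro l
  induction l with
  | nil => simp [PySem.List.insertBy]
  | cons y t ih =>
    simp only [List.map_cons, PySem.List.insertBy]
    by_cases h : PySem.List.pyGetD x.2 1 0 < PySem.List.pyGetD y.2 1 0
    · simp only [show ((pvG x).2.1 < (pvG y).2.1) = (PySem.List.pyGetD x.2 1 0 < PySem.List.pyGetD y.2 1 0) from rfl]
      simp [h]
    · simp only [show ((pvG x).2.1 < (pvG y).2.1) = (PySem.List.pyGetD x.2 1 0 < PySem.List.pyGetD y.2 1 0) from rfl]
      simp only [h, decide_false, Bool.false_eq_true, if_false, List.map_cons]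
      rw [ih]

theorem sorted_map_pvG (L : List (Int × List Int)) :
    PySem.List.sorted (L.map pvG) (fun t => t.2.1) false
      = (PySem.List.sorted L (fun x => PySem.List.pyGetD x.2 1 0) false).map pvG := by
  simp only [PySem.List.sorted]
  rw [List.foldl_map]
  suffices h : ∀ (l : List (Int × List Int)) (acc : List (Int × List Int)),
      List.foldl (fun acc x => PySem.List.insertBy (fun a b => decide (a.2.1 < b.2.1)) (pvG x) acc)
        (acc.map pvG) l
      = (List.foldl (fun acc x =>
          PySem.List.insertBy (fun a b => decide (PySem.List.pyGetD a.2 1 0 < PySem.List.pyGetD b.2 1 0)) x acc) acc l).map pvG by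
    simpa using h L []
  intro l
  induction l with
  | nil => intro acc; simp
  | cons x t ih =>
    intro acc
    simp only [List.foldl_cons]
    rw [insertBy_map_pvG x acc]
    exact ih _

-- fresh index: position i of a fst-nodup list does not occur among the first i indices
theorem not_mem_take_fst {L : List (Int × List Int)} (hnd : (L.map Prod.fst).Nodup)
    {i : Nat} (hi : i < L.length) : (L[i]).1 ∉ (L.take i).map Prod.fst := by
  intro hmem
  rcases List.mem_map.mp hmem with ⟨p, hp, hps⟩
  rcases List.mem_take_iff_getElem.mp hp with ⟨j, hj, hpj⟩
  have hji : j < i := by omega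
  have hjL : j < L.length := by omega
  have heq : (L.map Prod.fst)[j]'(by simpa using hjL) = (L.map Prod.fst)[i]'(by simpa using hi) := by
    simp only [List.getElem_map]
    rw [← hpj] at hps
    exact hps
  have := (List.Nodup.getElem_inj_iff hnd).mp heq
  omega

-- ===== the inner while loops advance in lock-step =====
theorem while_adv (L : List (Int × List Int)) (hnd : (L.map Prod.fst).Nodup) (hp : Int) :
    ∀ (fuel i : Nat) (heap elig : List (Int × Int)),
      L.length - i ≤ fuel → i ≤ L.length →
      heap.Perm (elig.map pvNeg) → heap.Pairwise pvSlt →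
      (∀ p ∈ elig, p.2 ∈ (L.take i).map Prod.fst) →
      ∃ (i' : Nat) (elig' heap' : List (Int × Int)),
        pvAdvance (L.map pvG) hp i elig = (i', elig') ∧
        pvWhileA hp (L.drop i) heap = (L.drop i', heap') ∧
        i' ≤ L.length ∧
        heap'.Perm (elig'.map pvNeg) ∧ heap'.Pairwise pvSlt ∧
        (∀ p ∈ elig', p.2 ∈ (L.take i').map Prod.fst) := by
  intro fuel
  induction fuel with
  | zero =>
    intro i heap elig hfuel hi hperm hpair hfresh
    have hieq : i = L.length := by omega
    subst hieq
    refine ⟨L.length, elig, heap, ?_, ?_, le_refl _, hperm, hpair, hfresh⟩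
    · unfold pvAdvance
      simp
    · simp [List.drop_length, pvWhileA]
  | succ n ih =>
    intro i heap elig hfuel hi hperm hpair hfresh
    by_cases h : i < L.length
    · have hdrop : L.drop i = L[i] :: L.drop (i + 1) := List.drop_eq_getElem_cons h
      have hoi : i < (L.map pvG).length := by simpa using h
      have hgeti : (L.map pvG)[i]'hoi = pvG L[i] := by simp
      by_cases hguard : 100 ≤ hp - PySem.List.pyGetD (L[i]).2 1 0
      · -- both loops consume L[i]
        have hx_fresh : ∀ y ∈ heap, (-(PySem.List.pyGetD (L[i]).2 0 0), (L[i]).1) ≠ y := by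
          intro y hy hcontra
          have hy' : y ∈ elig.map pvNeg := hperm.mem_iff.mp hy
          rcases List.mem_map.mp hy' with ⟨p, hpel, hpn⟩
          have hps : p.2 = (L[i]).1 := by
            have h2 := congrArg Prod.snd hpn
            simp only [pvNeg] at h2
            rw [h2, ← hcontra]
          exact not_mem_take_fst hnd h (hps ▸ hfresh p hpel)
        have hperm' : (pvHeapPush heap (-(PySem.List.pyGetD (L[i]).2 0 0), (L[i]).1)).Perm
            ((elig ++ [(PySem.List.pyGetD (L[i]).2 0 0, (L[i]).1)]).map pvNeg) := by
          refine (heapPush_perm _ _).trans ((hperm.cons _).trans ?_)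
          simp only [List.map_append, List.map_cons, List.map_nil, pvNeg]
          exact (List.perm_append_singleton _ _).symm
        have hpair' : (pvHeapPush heap (-(PySem.List.pyGetD (L[i]).2 0 0), (L[i]).1)).Pairwise pvSlt :=
          heapPush_pairwise hpair hx_fresh
        have hfresh' : ∀ p ∈ elig ++ [(PySem.List.pyGetD (L[i]).2 0 0, (L[i]).1)],
            p.2 ∈ (L.take (i + 1)).map Prod.fst := by
          intro p hpel
          rcases List.mem_append.mp hpel with hpel | hpel
          · exact List.IsPrefix.subset ((List.take_prefix_take_left (by omega)).map _)
              (hfresh p hpel)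
          · simp only [List.mem_singleton] at hpel
            subst hpel
            exact List.mem_map.mpr ⟨L[i], List.mem_take_iff_getElem.mpr ⟨i, by omega, rfl⟩, rfl⟩
        obtain ⟨i', elig', heap', hB, hA, hle, hperm'', hpair'', hfresh''⟩ :=
          ih (i + 1) (pvHeapPush heap (-(PySem.List.pyGetD (L[i]).2 0 0), (L[i]).1))
            (elig ++ [(PySem.List.pyGetD (L[i]).2 0 0, (L[i]).1)]) (by omega) (by omega) hperm' hpair' hfresh'
        refine ⟨i', elig', heap', ?_, ?_, hle, hperm'', hpair'', hfresh''⟩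
        · unfold pvAdvance
          rw [dif_pos hoi]
          simp only [hgeti, pvG]
          rw [if_pos hguard]
          exact hB
        · rw [hdrop]
          obtain ⟨idx, it, hLi⟩ : ∃ a b, L[i] = (a, b) := ⟨_, _, rfl⟩
          have hguard' : 100 ≤ hp - PySem.List.pyGetD it 1 0 := by
            rw [hLi] at hguard; simpa using hguard
          rw [hLi] at hA ⊢
          simp only [pvWhileA]
          rw [if_neg (by omega : ¬ hp - PySem.List.pyGetD it 1 0 < 100)]
          exact hA
      · -- both loops stop at i
        refine ⟨i, elig, heap, ?_, ?_, hi, hperm, hpair, hfresh⟩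
        · unfold pvAdvance
          rw [dif_pos hoi]
          simp only [hgeti, pvG]
          rw [if_neg hguard]
        · conv_lhs => rw [hdrop]
          obtain ⟨idx, it, hLi⟩ : ∃ a b, L[i] = (a, b) := ⟨_, _, rfl⟩
          have hguard' : ¬ 100 ≤ hp - PySem.List.pyGetD it 1 0 := by
            intro hc; exact hguard (by rw [hLi]; simpa using hc)
          rw [hLi] at ⊢
          simp only [pvWhileA]
          rw [if_pos (by omega : hp - PySem.List.pyGetD it 1 0 < 100)]
          rw [← hLi, ← hdrop]
    · have hieq : i = L.length := by omega
      subst hieq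
      refine ⟨L.length, elig, heap, ?_, ?_, le_refl _, hperm, hpair, hfresh⟩
      · unfold pvAdvance
        simp
      · simp [List.drop_length, pvWhileA]

-- ===== the outer folds agree =====
theorem fold_eq (L : List (Int × List Int)) (hnd : (L.map Prod.fst).Nodup) :
    ∀ (hs : List Int), ∀ (ans : List Int) (i : Nat) (elig heap : List (Int × Int)),
      i ≤ L.length →
      heap.Perm (elig.map pvNeg) → heap.Pairwise pvSlt →
      (∀ p ∈ elig, p.2 ∈ (L.take i).map Prod.fst) →
      (hs.foldl pvStepA (ans, L.drop i, heap)).1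
        = (hs.foldl (pvStepB (L.map pvG)) (ans, i, elig)).1 := by
  intro hs
  induction hs with
  | nil => intro ans i elig heap _ _ _ _; rfl
  | cons hp hs ih =>
    intro ans i elig heap hi hperm hpair hfresh
    obtain ⟨i', elig', heap', hB, hA, hle, hperm', hpair', hfresh'⟩ :=
      while_adv L hnd hp (L.length - i) i heap elig (le_refl _) hi hperm hpair hfresh
    simp only [List.foldl_cons]
    rcases heap' with _ | ⟨h0, hrest⟩
    · -- heap empty after the sweep: neither side appends
      have helig : elig' = [] := List.map_eq_nil_iff.mp (List.nil_perm.mp hperm')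
      subst helig
      have hstA : pvStepA (ans, L.drop i, heap) hp = (ans, L.drop i', []) := by
        unfold pvStepA
        rw [hA]
      have hstB : pvStepB (L.map pvG) (ans, i, elig) hp = (ans, i', []) := by
        unfold pvStepB
        rw [hB]
        rfl
      rw [hstA, hstB]
      exact ih ans i' [] [] hle (List.Perm.refl _) List.Pairwise.nil (by simp)
    · -- heap nonempty: A pops the head, B removes the min-scan pick
      obtain ⟨m, hm, hmn, hmin2, hrem, hperm'', hpair''⟩ := pop_corr hperm' hpair' rfl
      have hne : elig' ≠ [] := fun hc => by subst hc; cases hm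
      have hEmpty : elig'.isEmpty = false := by simp [hne]
      have hstA : pvStepA (ans, L.drop i, heap) hp = (ans ++ [h0.2], L.drop i', hrest) := by
        unfold pvStepA
        rw [hA]
      have hstB : pvStepB (L.map pvG) (ans, i, elig) hp = (ans ++ [m.2], i', elig'.erase m) := by
        unfold pvStepB
        rw [hB]
        simp only [hEmpty, Bool.false_eq_true, if_false, hmin2, hrem, Option.getD_some]
      have hval : h0.2 = m.2 := by rw [← hmn]; rfl
      rw [hstA, hstB, hval]
      refine ih (ans ++ [m.2]) i' (elig'.erase m) hrest hle hperm'' hpair'' ?_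
      intro p hpel
      exact hfresh' p (List.mem_of_mem_erase hpel)

-- ===== VERDICT (by name: the statement is the Claim_ definition above) =====
theorem solution_spec : Claim_equal_solution := by
  intro healths items _ _
  unfold Spec_solution solution solution_alt
  have hmap : (PySem.List.enumerate items 1).map
      (fun p => (PySem.List.pyGetD p.2 0 0, PySem.List.pyGetD p.2 1 0, p.1))
      = (PySem.List.enumerate items 1).map pvG := rfl
  rw [hmap, sorted_map_pvG]
  have hnd : ((PySem.List.sorted (PySem.List.enumerate items 1)
      (fun x => PySem.List.pyGetD x.2 1 0) false).map Prod.fst).Nodup := by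
    have hperm := (PySem.List.sorted_perm (PySem.List.enumerate items 1)
      (fun x => PySem.List.pyGetD x.2 1 0) false).map Prod.fst
    exact hperm.nodup_iff.mpr (enum_fst_nodup items 1)
  have h := fold_eq _ hnd (PySem.List.sorted healths (fun x => x) false) [] 0 [] []
    (by omega) (List.Perm.refl _) List.Pairwise.nil (by simp)
  simp only [List.drop_zero] at h
  exact congrArg (fun l => PySem.List.sorted l (fun x => x) false) h
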